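-- pv_equiv track=rewrite | github.com/cda2/BJ | python/src/bj10815.py | solution
-- ===== SOURCE A (Python) =====
-- def solution(n, actual_arr, m, find_arr):
--     result = []
--     for data in find_arr:
--         if data in actual_arr:
--             result.append("1")
--         else:
--             result.append("0")
--     return " ".join(result)
-- ===== SOURCE B (Python) =====
-- def solution(n, actual_arr, m, find_arr):
--     cards = sorted(actual_arr)
--     out = []
--     for q in find_arr:
--         lo, hi = 0, len(cards)
--         while lo < hi:
--             mid = (lo + hi) // 2
--             if cards[mid] < q:
--                 lo = mid + 1
--             else:
--                 hi = mid
--         out.append("1" if lo < len(cards) and cards[lo] == q else "0")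
--     return " ".join(out)
-- ===== Notes on version B (the rewrite author's own statement) =====
-- stated objective: faster
-- what changed: B sorts a copy of actual_arr once and answers each query with a hand-written binary search instead of A's linear 'in' scan per query.
import Mathlib
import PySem

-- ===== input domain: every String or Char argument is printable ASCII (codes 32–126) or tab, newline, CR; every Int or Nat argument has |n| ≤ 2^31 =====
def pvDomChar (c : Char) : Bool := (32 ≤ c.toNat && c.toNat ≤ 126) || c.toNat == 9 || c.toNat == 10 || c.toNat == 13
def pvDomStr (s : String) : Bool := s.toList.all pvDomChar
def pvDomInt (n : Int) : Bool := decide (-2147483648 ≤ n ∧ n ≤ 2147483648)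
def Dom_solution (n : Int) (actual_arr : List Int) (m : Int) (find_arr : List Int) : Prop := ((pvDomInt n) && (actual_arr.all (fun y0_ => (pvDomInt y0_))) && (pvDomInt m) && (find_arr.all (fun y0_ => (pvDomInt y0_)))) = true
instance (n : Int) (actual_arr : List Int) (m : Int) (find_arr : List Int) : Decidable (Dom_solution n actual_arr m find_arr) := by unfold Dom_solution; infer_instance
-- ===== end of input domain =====

-- B sorts a copy of actual_arr once and answers each query by binary search instead of A's linear scan per query (objective: faster).

-- ===== PORT A =====
def solution (n : Int) (actual_arr : List Int) (m : Int) (find_arr : List Int) : String :=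
  let result : List String := find_arr.foldl
    (fun result data => if data ∈ actual_arr then result ++ ["1"] else result ++ ["0"]) []
  PySem.Str.join " " result

-- ===== PORT B =====
-- while lo < hi: mid = (lo+hi)//2; if cards[mid] < q: lo = mid+1 else: hi = mid   (lo, hi stay in [0, len])
def bsearchLo (cards : List Int) (q : Int) (lo hi : Nat) : Nat :=
  if lo < hi then
    let mid := (lo + hi) / 2
    if cards.getD mid 0 < q then bsearchLo cards q (mid + 1) hi
    else bsearchLo cards q lo mid
  else lo
termination_by hi - lo
decreasing_by all_goals omega

def solution_alt (n : Int) (actual_arr : List Int) (m : Int) (find_arr : List Int) : String :=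
  let cards := PySem.List.sorted actual_arr (fun x => x) false
  let out : List String := find_arr.foldl
    (fun out q =>
      let lo := bsearchLo cards q 0 cards.length
      out ++ [if lo < cards.length ∧ cards.getD lo 0 = q then "1" else "0"]) []
  PySem.Str.join " " out

-- ===== PRECONDITION & SPEC =====
def Spec_solution (n : Int) (actual_arr : List Int) (m : Int) (find_arr : List Int) (out : String) : Prop := out = solution_alt n actual_arr m find_arr
instance (n : Int) (actual_arr : List Int) (m : Int) (find_arr : List Int) (out : String) : Decidable (Spec_solution n actual_arr m find_arr out) := by unfold Spec_solution; infer_instance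

-- ===== CLAIM (what is proved, stated in full; the proofs are below) =====
def Claim_equal_solution : Prop := ∀ (n : Int) (actual_arr : List Int) (m : Int) (find_arr : List Int), Dom_solution n actual_arr m find_arr → Spec_solution n actual_arr m find_arr (solution n actual_arr m find_arr)

-- ===== LEMMAS AND PROOFS =====

-- Binary-search invariant: on a sorted list, with everything left of lo below q and
-- everything from hi on at least q, the final index decides membership of q.
lemma bsearch_mem (cards : List Int) (q : Int) (lo hi : Nat)
    (hs : cards.Pairwise (· ≤ ·))
    (hhi : hi ≤ cards.length) (hlh : lo ≤ hi)
    (hlow : ∀ i, i < lo → cards.getD i 0 < q)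
    (hhigh : ∀ i, hi ≤ i → i < cards.length → q ≤ cards.getD i 0) :
    ((bsearchLo cards q lo hi < cards.length ∧ cards.getD (bsearchLo cards q lo hi) 0 = q) ↔ q ∈ cards) := by
  have hmono : ∀ i j : Nat, i ≤ j → j < cards.length → cards.getD i 0 ≤ cards.getD j 0 := by
    intro i j hij hj
    rcases Nat.lt_or_ge i j with h | h
    · rw [List.getD_eq_getElem _ _ (by omega), List.getD_eq_getElem _ _ hj]
      exact (List.pairwise_iff_getElem.mp hs) i j (by omega) hj h
    · have : i = j := by omega
      simp [this]
  induction lo, hi using bsearchLo.induct cards q with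
  | case1 lo hi h mid hlt ih =>
    rw [bsearchLo, if_pos h]
    simp only [show mid = (lo+hi)/2 from rfl] at *
    rw [if_pos hlt]
    exact ih hhi (by omega)
      (fun i hi' => lt_of_le_of_lt (hmono i ((lo+hi)/2) (by omega) (by omega)) hlt)
      hhigh
  | case2 lo hi h mid hge ih =>
    rw [bsearchLo, if_pos h]
    simp only [show mid = (lo+hi)/2 from rfl] at *
    rw [if_neg hge]
    exact ih (by omega) (by omega) hlow
      (fun i hi' hilen => le_trans (not_lt.mp hge) (hmono ((lo+hi)/2) i hi' hilen))
  | case3 lo hi h =>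
    rw [bsearchLo, if_neg h]
    constructor
    · rintro ⟨hlt, heq⟩
      rw [List.getD_eq_getElem _ _ hlt] at heq
      exact heq ▸ List.getElem_mem hlt
    · intro hq
      obtain ⟨i, hi', heq⟩ := List.getElem_of_mem hq
      have hge : lo ≤ i := by
        by_contra hc
        have hlt' := hlow i (by omega)
        rw [List.getD_eq_getElem _ _ hi', heq] at hlt'
        exact absurd hlt' (lt_irrefl q)
      have hlen : lo < cards.length := by omega
      have h1 : cards.getD lo 0 ≤ q := by
        have := hmono lo i hge hi'
        rwa [List.getD_eq_getElem _ _ hi', heq] at this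
      have h2 : q ≤ cards.getD lo 0 := hhigh lo (by omega) hlen
      exact ⟨hlen, le_antisymm h1 h2⟩

lemma bit_eq (actual_arr : List Int) (q : Int) :
    (if q ∈ actual_arr then (["1"] : List String) else ["0"]) =
    [if bsearchLo (PySem.List.sorted actual_arr (fun x => x) false) q 0
          (PySem.List.sorted actual_arr (fun x => x) false).length <
          (PySem.List.sorted actual_arr (fun x => x) false).length ∧
        (PySem.List.sorted actual_arr (fun x => x) false).getD
          (bsearchLo (PySem.List.sorted actual_arr (fun x => x) false) q 0
            (PySem.List.sorted actual_arr (fun x => x) false).length) 0 = q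
      then "1" else "0"] := by
  have hmem := bsearch_mem (PySem.List.sorted actual_arr (fun x => x) false) q 0
    (PySem.List.sorted actual_arr (fun x => x) false).length
    (PySem.List.sorted_pairwise actual_arr (fun x => x))
    le_rfl (Nat.zero_le _) (by omega) (by omega)
  rw [PySem.List.mem_sorted] at hmem
  by_cases hq : q ∈ actual_arr
  · simp only [if_pos hq, if_pos (hmem.mpr hq)]
  · simp only [if_neg hq, if_neg (fun hc => hq (hmem.mp hc))]

lemma fold_eq (actual_arr : List Int) (fs : List Int) (acc : List String) :
    fs.foldl (fun result data => if data ∈ actual_arr then result ++ ["1"] else result ++ ["0"]) acc =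
    fs.foldl (fun out q =>
      let lo := bsearchLo (PySem.List.sorted actual_arr (fun x => x) false) q 0
        (PySem.List.sorted actual_arr (fun x => x) false).length
      out ++ [if lo < (PySem.List.sorted actual_arr (fun x => x) false).length ∧
          (PySem.List.sorted actual_arr (fun x => x) false).getD lo 0 = q then "1" else "0"]) acc := by
  induction fs generalizing acc with
  | nil => rfl
  | cons q fs ih =>
    simp only [List.foldl_cons]
    rw [show (if q ∈ actual_arr then acc ++ ["1"] else acc ++ ["0"]) =
        acc ++ (if q ∈ actual_arr then ["1"] else ["0"]) from (apply_ite (acc ++ ·) _ _ _).symm,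
      bit_eq]
    exact ih _

-- ===== VERDICT (by name: the statement is the Claim_ definition above) =====
theorem solution_spec : Claim_equal_solution := by
  intro n actual_arr m find_arr _
  unfold Spec_solution solution solution_alt
  exact congrArg (PySem.Str.join " ") (fold_eq actual_arr find_arr [])
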